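-- pv_equiv track=rewrite | github.com/ts06067/baby-rijndael | babyr.py | convert_to_bin_m
-- ===== SOURCE A (Python) =====
-- def convert_to_bin_m(x):
--     # input: x: size 4, output: 8*2
--     m0 = 0x1
--     m1 = 0x2
--     m2 = 0x4
--     m3 = 0x8
--
--     bin_m = [] # intermediate 4*4 form
--     for i in range(4):
--         x3 = x[i]&m3
--         x2 = x[i]&m2
--         x1 = x[i]&m1
--         x0 = x[i]&m0
--         xi = [x3, x2, x1, x0]
--         for i in range(4):
--             if xi[i] > 0:
--                 xi[i] = 1
--         bin_m.append(xi)
--     return [bin_m[0]+bin_m[1], bin_m[2]+bin_m[3]] # final 8*2 form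
-- ===== SOURCE B (Python) =====
-- def convert_to_bin_m(x):
--     # input: x: size 4, output: 8*2
--     def nib(v):
--         n = v % 16
--         bits = []
--         for _ in range(4):
--             n, b = divmod(n, 2)
--             bits.append(b)
--         bits.reverse()
--         return bits
--     return [nib(x[0]) + nib(x[1]), nib(x[2]) + nib(x[3])]
-- ===== Notes on version B (the rewrite author's own statement) =====
-- stated objective: simpler
-- what changed: B replaces A's four per-bit mask constants and the separate thresholding inner loop with a single mod-16 reduction followed by repeated divmod-by-2 base-2 decomposition (bits collected LSB-first and reversed), and builds the two rows directly from the four nibbles.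
import Mathlib
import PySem

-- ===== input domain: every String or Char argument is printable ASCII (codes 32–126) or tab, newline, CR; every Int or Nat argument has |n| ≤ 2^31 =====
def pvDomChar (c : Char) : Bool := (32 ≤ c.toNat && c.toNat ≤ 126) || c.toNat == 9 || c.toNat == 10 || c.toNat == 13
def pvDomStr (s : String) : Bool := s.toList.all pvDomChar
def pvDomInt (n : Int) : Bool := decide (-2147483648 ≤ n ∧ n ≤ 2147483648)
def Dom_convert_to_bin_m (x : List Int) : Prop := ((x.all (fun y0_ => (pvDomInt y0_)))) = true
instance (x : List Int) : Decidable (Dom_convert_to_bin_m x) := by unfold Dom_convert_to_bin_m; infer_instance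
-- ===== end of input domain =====

-- B replaces A's per-bit masking and thresholding inner loop with one mod-16 reduction followed by
-- repeated divmod-by-2 base-2 decomposition (LSB first, then reversed); objective: simpler.

-- ===== PORT A =====
-- literal port of A; Pre_ guarantees the x[i] lookups are in range, so the .getD defaults are unreachable
-- loop body of A's outer 'for i in range(4)' (the masks and the thresholding inner loop), factored
def aRow (xv : Int) : List Int :=
  let x3 := PySem.Int.band xv 8
  let x2 := PySem.Int.band xv 4
  let x1 := PySem.Int.band xv 2
  let x0 := PySem.Int.band xv 1
  let xi := [x3, x2, x1, x0]
  (PySem.List.pyRange 0 4 1).foldl (fun xi i =>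
    if (PySem.List.pyGet? xi i).getD 0 > 0 then xi.set i.toNat 1 else xi) xi

def convert_to_bin_m (x : List Int) : List (List Int) :=
  let bin_m : List (List Int) :=
    (PySem.List.pyRange 0 4 1).foldl (fun bin_m i =>
      bin_m ++ [aRow ((PySem.List.pyGet? x i).getD 0)]) []
  [(PySem.List.pyGet? bin_m 0).getD [] ++ (PySem.List.pyGet? bin_m 1).getD [],
   (PySem.List.pyGet? bin_m 2).getD [] ++ (PySem.List.pyGet? bin_m 3).getD []]

-- ===== PORT B =====
-- nib: n = v % 16; four times n, b = divmod(n, 2) appending b; reversed at the end.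
-- divisor 2 ≠ 0, so the divmod? .getD default is unreachable.
def nibAlt (v : Int) : List Int :=
  let st := (PySem.List.pyRange 0 4 1).foldl
    (fun (st : Int × List Int) _ =>
      let nb := (PySem.Int.divmod? st.1 2).getD (0, 0)
      (nb.1, st.2 ++ [nb.2]))
    (PySem.Int.mod v 16, [])
  st.2.reverse

def convert_to_bin_m_alt (x : List Int) : List (List Int) :=
  [nibAlt ((PySem.List.pyGet? x 0).getD 0) ++ nibAlt ((PySem.List.pyGet? x 1).getD 0),
   nibAlt ((PySem.List.pyGet? x 2).getD 0) ++ nibAlt ((PySem.List.pyGet? x 3).getD 0)]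

-- ===== PRECONDITION & SPEC =====
-- A (and B) raise IndexError on lists of fewer than 4 elements; extra elements are ignored.
def Pre_convert_to_bin_m (x : List Int) : Prop := 4 ≤ x.length
instance (x : List Int) : Decidable (Pre_convert_to_bin_m x) := by unfold Pre_convert_to_bin_m; infer_instance
def pvWitness_convert_to_bin_m : List Int := [1, 2, 3, 4]

def Spec_convert_to_bin_m (x : List Int) (out : List (List Int)) : Prop := out = convert_to_bin_m_alt x
instance (x : List Int) (out : List (List Int)) : Decidable (Spec_convert_to_bin_m x out) := by unfold Spec_convert_to_bin_m; infer_instance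

-- ===== CLAIM (what is proved, stated in full; the proofs are below) =====
def Claim_equal_convert_to_bin_m : Prop := ∀ (x : List Int), Dom_convert_to_bin_m x → Pre_convert_to_bin_m x → Spec_convert_to_bin_m x (convert_to_bin_m x)

-- ===== LEMMAS AND PROOFS =====

theorem nat_and_two_pow (n i : Nat) : n &&& 2 ^ i = 2 ^ i * (n / 2 ^ i % 2) := by
  have h := Nat.and_two_pow n i
  rw [Nat.testBit_eq_decide_div_mod_eq] at h
  rcases Nat.mod_two_eq_zero_or_one (n / 2 ^ i) with h1 | h1 <;>
    simpa [h1, Nat.mul_comm] using h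

theorem band_pow (v : Int) (m : Nat) (hm : m = 1 ∨ m = 2 ∨ m = 4 ∨ m = 8) :
    PySem.Int.band v (m : Int) = (m : Int) * (v / (m : Int) % 2) := by
  have hp : ∀ n : Nat, n &&& m = m * (n / m % 2) := by
    intro n
    rcases hm with h | h | h | h <;> subst h
    · have := nat_and_two_pow n 0; simp only [pow_zero] at this; exact this
    · simpa using nat_and_two_pow n 1
    · have := nat_and_two_pow n 2; norm_num at this; exact this
    · have := nat_and_two_pow n 3; norm_num at this; exact this
  rcases hm with h | h | h | h <;> subst h <;>
  · by_cases hv : 0 ≤ v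
    · rw [PySem.Int.band_of_nonneg hv (by norm_num)]
      have h1 := hp v.toNat
      simp only [show Int.toNat 1 = 1 from by decide, show Int.toNat 2 = 2 from by decide,
        show Int.toNat 4 = 4 from by decide, show Int.toNat 8 = 8 from by decide,
        Nat.cast_ofNat, Nat.cast_one]
      omega
    · simp only [PySem.Int.band]
      rw [if_neg hv, if_pos (by norm_num)]
      have h1 := hp ((-v - 1).toNat)
      rw [Nat.and_comm] at h1
      simp only [show Int.toNat 1 = 1 from by decide, show Int.toNat 2 = 2 from by decide,
        show Int.toNat 4 = 4 from by decide, show Int.toNat 8 = 8 from by decide,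
        Nat.cast_ofNat, Nat.cast_one]
      omega

theorem nibA_eq (v : Int) : aRow v = nibAlt v := by
  have h8 : PySem.Int.band v 8 = 8 * (v / 8 % 2) := by
    have := band_pow v 8 (by tauto); push_cast at this; exact this
  have h4 : PySem.Int.band v 4 = 4 * (v / 4 % 2) := by
    have := band_pow v 4 (by tauto); push_cast at this; exact this
  have h2 : PySem.Int.band v 2 = 2 * (v / 2 % 2) := by
    have := band_pow v 2 (by tauto); push_cast at this; exact this
  have h1 : PySem.Int.band v 1 = v % 2 := by
    have := band_pow v 1 (by tauto); push_cast at this; simpa using this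
  have hv16 : PySem.Int.mod v 16 = 8 * (v / 8 % 2) + 4 * (v / 4 % 2) + 2 * (v / 2 % 2) + v % 2 := by
    rw [PySem.Int.mod_eq_emod_of_pos (by norm_num)]
    omega
  simp only [aRow, nibAlt]
  rw [hv16, h8, h4, h2, h1]
  rcases Int.emod_two_eq (v / 8) with b3 | b3 <;>
    rcases Int.emod_two_eq (v / 4) with b2 | b2 <;>
      rcases Int.emod_two_eq (v / 2) with b1 | b1 <;>
        rcases Int.emod_two_eq v with b0 | b0 <;>
          rw [b3, b2, b1, b0] <;> decide

-- ===== VERDICT (by name: the statement is the Claim_ definition above) =====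
theorem convert_to_bin_m_spec : Claim_equal_convert_to_bin_m := by
  intro x _hdom hpre
  unfold Pre_convert_to_bin_m at hpre
  match x, hpre with
  | a :: b :: c :: d :: t, _ =>
    show convert_to_bin_m _ = convert_to_bin_m_alt _
    have hR : PySem.List.pyRange 0 4 1 = [0, 1, 2, 3] := by decide
    have g0 : PySem.List.pyGet? (a :: b :: c :: d :: t) 0 = some a := by simp [pysem]
    have g1 : PySem.List.pyGet? (a :: b :: c :: d :: t) 1 = some b := by simp [pysem]
    have g2 : PySem.List.pyGet? (a :: b :: c :: d :: t) 2 = some c := by simp [pysem]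
    have g3 : PySem.List.pyGet? (a :: b :: c :: d :: t) 3 = some d := by simp [pysem]
    simp only [convert_to_bin_m, convert_to_bin_m_alt, hR, List.foldl, g0, g1, g2, g3,
      Option.getD_some, List.nil_append]
    have q : ∀ (w y z u : List Int) (i : Int), 0 ≤ i → i < 4 →
        PySem.List.pyGet? [w, y, z, u] i = [w, y, z, u][i.toNat]? := by
      intro w y z u i h1 h2
      rw [PySem.List.pyGet?_of_nonneg _ h1]
    simp only [List.cons_append, List.nil_append]
    rw [q _ _ _ _ 0 (by norm_num) (by norm_num), q _ _ _ _ 1 (by norm_num) (by norm_num),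
        q _ _ _ _ 2 (by norm_num) (by norm_num), q _ _ _ _ 3 (by norm_num) (by norm_num)]
    simp [nibA_eq]
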